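-- pv_equiv track=rewrite | github.com/PetrusKirsten/RheometerPlots | tests/outliers.py | getCteRange
-- ===== SOURCE A (Python) =====
-- def getCteRange(array, threshold):
--     ranges = []
--     init_range = 0
--
--     for i in range(1, len(array)):
--         if abs(array[i] - array[i - 1]) > threshold:
--             if init_range < i - 1:
--                 ranges.append((init_range, i - 1))
--             init_range = i
--
--     if init_range < len(array) - 1:
--         ranges.append((init_range, len(array) - 1))
--
--     return ranges
-- ===== SOURCE B (Python) =====
-- def getCteRange(array, threshold):
--     n = len(array)
--     breaks = [i for i in range(1, n) if abs(array[i] - array[i - 1]) > threshold]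
--     starts = [0] + breaks
--     ends = [b - 1 for b in breaks] + [n - 1]
--     return [(s, e) for s, e in zip(starts, ends) if e > s]
-- ===== Notes on version B (the rewrite author's own statement) =====
-- stated objective: alternative
-- what changed: B first computes all breakpoint indices in one comprehension, then builds the segments by zipping the start and end tables, instead of A's fused loop carrying a running init_range and appending as it goes.
import Mathlib
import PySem

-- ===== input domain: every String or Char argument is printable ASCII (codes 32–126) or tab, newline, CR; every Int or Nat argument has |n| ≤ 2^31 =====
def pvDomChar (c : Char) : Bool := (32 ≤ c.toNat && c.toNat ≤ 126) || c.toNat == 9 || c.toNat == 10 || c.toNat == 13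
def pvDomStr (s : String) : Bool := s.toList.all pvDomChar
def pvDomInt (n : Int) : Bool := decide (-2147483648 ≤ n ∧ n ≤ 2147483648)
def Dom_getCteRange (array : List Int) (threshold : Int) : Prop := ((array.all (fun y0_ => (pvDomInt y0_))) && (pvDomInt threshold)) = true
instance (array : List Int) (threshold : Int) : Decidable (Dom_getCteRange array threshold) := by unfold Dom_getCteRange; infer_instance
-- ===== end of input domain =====

-- B computes the breakpoint table first and shapes the segments from it, instead of A's fused loop with a running init_range (alternative decomposition, same cost).

-- array[i] for an index known to be in range (all loop indices here are); exact since 0 ≤ i < len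
def pvAt (array : List Int) (i : Int) : Int := (PySem.List.pyGet? array i).getD 0

-- ===== PORT A =====
def getCteRange (array : List Int) (threshold : Int) : List (Int × Int) :=
  let n : Int := array.length
  let st := (PySem.List.pyRange 1 n 1).foldl
    (fun (s : List (Int × Int) × Int) i =>
      if |pvAt array i - pvAt array (i - 1)| > threshold then
        (if s.2 < i - 1 then s.1 ++ [(s.2, i - 1)] else s.1, i)
      else s)
    ([], 0)
  if st.2 < n - 1 then st.1 ++ [(st.2, n - 1)] else st.1

-- ===== PORT B =====
def getCteRange_alt (array : List Int) (threshold : Int) : List (Int × Int) :=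
  let n : Int := array.length
  let breaks := (PySem.List.pyRange 1 n 1).filter
    (fun i => decide (|pvAt array i - pvAt array (i - 1)| > threshold))
  let starts := 0 :: breaks
  let ends := breaks.map (fun b => b - 1) ++ [n - 1]
  (starts.zip ends).filter (fun p => decide (p.2 > p.1))

-- ===== PRECONDITION & SPEC =====
def Spec_getCteRange (array : List Int) (threshold : Int) (out : List (Int × Int)) : Prop := out = getCteRange_alt array threshold
instance (array : List Int) (threshold : Int) (out : List (Int × Int)) : Decidable (Spec_getCteRange array threshold out) := by unfold Spec_getCteRange; infer_instance

-- ===== CLAIM (what is proved, stated in full; the proofs are below) =====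
def Claim_equal_getCteRange : Prop := ∀ (array : List Int) (threshold : Int), Dom_getCteRange array threshold → Spec_getCteRange array threshold (getCteRange array threshold)

-- ===== LEMMAS AND PROOFS =====

-- segments generated by a break list, and the final init value after it
def pvSegs (bs : List Int) (init : Int) : List (Int × Int) :=
  match bs with
  | [] => []
  | b :: bs => (if init < b - 1 then [(init, b - 1)] else []) ++ pvSegs bs b

def pvFinit (bs : List Int) (init : Int) : Int :=
  match bs with
  | [] => init
  | b :: bs => pvFinit bs b

-- A's loop equals: append the segments of the surviving breaks, final init = last break
theorem pvLoop_eq (p : Int → Prop) [DecidablePred p] (l : List Int)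
    (acc : List (Int × Int)) (init : Int) :
    l.foldl
      (fun (s : List (Int × Int) × Int) i =>
        if p i then (if s.2 < i - 1 then s.1 ++ [(s.2, i - 1)] else s.1, i) else s)
      (acc, init)
    = (acc ++ pvSegs (l.filter (fun i => decide (p i))) init,
       pvFinit (l.filter (fun i => decide (p i))) init) := by
  induction l generalizing acc init with
  | nil => simp [pvSegs, pvFinit]
  | cons x l ih =>
    by_cases hx : p x
    · simp only [List.foldl_cons, List.filter_cons, hx, if_pos, decide_true, ih, pvSegs, pvFinit]
      by_cases h2 : init < x - 1 <;> simp [h2, List.append_assoc]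
    · simp [List.foldl_cons, hx, ih]

-- B's zip-filter equals: the segments plus the closing segment of the last init
theorem pvZip_eq (bs : List Int) (init m : Int) :
    (((init :: bs).zip (bs.map (fun b => b - 1) ++ [m])).filter
        (fun p => decide (p.2 > p.1)))
    = pvSegs bs init ++ (if pvFinit bs init < m then [(pvFinit bs init, m)] else []) := by
  induction bs generalizing init with
  | nil =>
    by_cases h : init < m <;> simp [pvSegs, pvFinit, List.filter, h]
  | cons b bs ih =>
    simp only [List.map_cons, List.cons_append, List.zip_cons_cons, List.filter_cons, pvSegs,
      pvFinit, ih]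
    by_cases h : init < b - 1 <;> simp [h]

-- ===== VERDICT (by name: the statement is the Claim_ definition above) =====
theorem getCteRange_spec : Claim_equal_getCteRange := by
  intro array threshold _
  unfold Spec_getCteRange getCteRange getCteRange_alt
  dsimp only
  rw [pvLoop_eq (fun i => |pvAt array i - pvAt array (i - 1)| > threshold), pvZip_eq]
  dsimp only
  split <;> simp
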